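-- pv_equiv track=rewrite | github.com/dinesh9110/FLAMES-game | FLAMES game.py | flames_result
-- ===== SOURCE A (Python) =====
-- def flames_result(count):
--     flames = ['Friends', 'Lovers', 'Affectionate', 'Marriage', 'Enemies', 'Siblings']
--
--     while len(flames) > 1:
--         split_index = (count % len(flames)) - 1
--
--         if split_index >= 0:
--             right = flames[split_index + 1:]
--             left = flames[:split_index]
--             flames = right + left
--         else:
--             flames = flames[:len(flames) - 1]
--
--     return flames[0]
-- ===== SOURCE B (Python) =====
-- def flames_result(count):
--     # Josephus recurrence: compute the surviving original index directly,
--     # no list mutation or slicing.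
--     flames = ['Friends', 'Lovers', 'Affectionate', 'Marriage', 'Enemies', 'Siblings']
--     idx = 0
--     for k in range(2, 7):
--         idx = (idx + count) % k
--     return flames[idx]
-- ===== Notes on version B (the rewrite author's own statement) =====
-- stated objective: simpler
-- what changed: Replaced the repeated list-slicing elimination loop with the closed Josephus recurrence idx=(idx+count)%k over k=2..6 and a single index into the fixed list.
import Mathlib
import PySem

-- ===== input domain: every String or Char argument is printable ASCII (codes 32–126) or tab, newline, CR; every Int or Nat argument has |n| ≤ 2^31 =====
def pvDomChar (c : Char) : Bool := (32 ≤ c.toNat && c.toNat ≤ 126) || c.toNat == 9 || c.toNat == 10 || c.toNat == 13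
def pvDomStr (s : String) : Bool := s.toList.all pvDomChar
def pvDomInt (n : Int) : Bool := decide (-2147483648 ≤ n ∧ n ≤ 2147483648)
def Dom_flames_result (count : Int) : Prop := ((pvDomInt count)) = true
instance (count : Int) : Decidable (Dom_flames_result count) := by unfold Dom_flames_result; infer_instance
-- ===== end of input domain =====

-- B replaces A's slice-and-rotate elimination loop with the Josephus recurrence
-- idx = (idx + count) % k for k = 2..6 and a single index into the fixed list (simpler).

-- ===== PORT A =====
-- A's while loop: eliminate by slicing and rotating until one name remains.
def flamesLoopA (count : Int) (fuel : Nat) (flames : List String) : List String :=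
  match fuel with
  | 0 => flames
  | fuel + 1 =>
    if 1 < flames.length then
      let si : Int := PySem.Int.mod count (flames.length : Int) - 1
      if 0 ≤ si then
        flamesLoopA count fuel
          (PySem.List.slice flames (some (si + 1)) none ++ PySem.List.slice flames none (some si))
      else
        flamesLoopA count fuel (PySem.List.slice flames none (some ((flames.length : Int) - 1)))
    else flames

def flames_result (count : Int) : String :=
  PySem.List.pyGetD
    (flamesLoopA count 6 ["Friends", "Lovers", "Affectionate", "Marriage", "Enemies", "Siblings"])
    0 ""

-- ===== PORT B =====
def flames_result_alt (count : Int) : String :=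
  let flames : List String :=
    ["Friends", "Lovers", "Affectionate", "Marriage", "Enemies", "Siblings"]
  let idx : Int :=
    (PySem.List.pyRange 2 7 1).foldl (fun idx k => PySem.Int.mod (idx + count) k) 0
  PySem.List.pyGetD flames idx ""

-- ===== PRECONDITION & SPEC =====
def Spec_flames_result (count : Int) (out : String) : Prop := out = flames_result_alt count
instance (count : Int) (out : String) : Decidable (Spec_flames_result count out) := by unfold Spec_flames_result; infer_instance

-- ===== CLAIM (what is proved, stated in full; the proofs are below) =====
def Claim_equal_flames_result : Prop := ∀ (count : Int), Dom_flames_result count → Spec_flames_result count (flames_result count)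

-- ===== LEMMAS AND PROOFS =====

-- Both programs only ever take `count` modulo 2,3,4,5,6, all divisors of 60,
-- so each result is determined by count % 60.

theorem pyMod_congr_of_dvd (k a b : Int) (hk : 0 < k) (hdvd : k ∣ 60)
    (h : a % 60 = b % 60) : PySem.Int.mod a k = PySem.Int.mod b k := by
  rw [PySem.Int.mod_eq_emod_of_pos hk, PySem.Int.mod_eq_emod_of_pos hk,
    ← Int.emod_emod_of_dvd a hdvd, ← Int.emod_emod_of_dvd b hdvd, h]

theorem loopA_congr (a b : Int) (h : a % 60 = b % 60) (fuel : Nat) (xs : List String)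
    (hlen : xs.length ≤ 6) : flamesLoopA a fuel xs = flamesLoopA b fuel xs := by
  induction fuel generalizing xs with
  | zero => rfl
  | succ fuel ih =>
    rw [flamesLoopA, flamesLoopA]
    by_cases h1 : 1 < xs.length
    · have hdvd : ((xs.length : Int)) ∣ 60 := by interval_cases h' : xs.length <;> decide
      have hpos : (0 : Int) < (xs.length : Int) := by exact_mod_cast Nat.lt_of_lt_of_le Nat.zero_lt_one (le_of_lt h1)
      have hmods : PySem.Int.mod a (xs.length : Int) = PySem.Int.mod b (xs.length : Int) :=
        pyMod_congr_of_dvd _ a b hpos hdvd h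
      simp only [h1, if_true]
      rw [← hmods]
      by_cases h2 : (0 : Int) ≤ PySem.Int.mod a (xs.length : Int) - 1
      · simp only [h2, if_true]
        apply ih
        rw [PySem.List.slice_from xs (by omega), PySem.List.slice_to xs h2]
        simp only [List.length_append, List.length_drop, List.length_take]
        omega
      · simp only [h2, if_false]
        apply ih
        rw [PySem.List.slice_to xs (by omega)]
        simp only [List.length_take]
        omega
    · simp [h1]

theorem stepB_congr (k x y a b : Int) (hk : 0 < k) (hdvd : k ∣ 60)
    (hxy : x = y) (h : a % 60 = b % 60) :
    PySem.Int.mod (x + a) k = PySem.Int.mod (y + b) k := by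
  subst hxy
  apply pyMod_congr_of_dvd k _ _ hk hdvd
  rw [Int.add_emod, h, ← Int.add_emod]

theorem altIdx_congr (a b : Int) (h : a % 60 = b % 60) :
    (PySem.List.pyRange 2 7 1).foldl (fun idx k => PySem.Int.mod (idx + a) k) 0 =
    (PySem.List.pyRange 2 7 1).foldl (fun idx k => PySem.Int.mod (idx + b) k) 0 := by
  have hr : PySem.List.pyRange 2 7 1 = [2, 3, 4, 5, 6] := by decide
  rw [hr]
  simp only [List.foldl]
  apply stepB_congr 6 _ _ a b (by norm_num) (by norm_num) _ h
  apply stepB_congr 5 _ _ a b (by norm_num) (by norm_num) _ h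
  apply stepB_congr 4 _ _ a b (by norm_num) (by norm_num) _ h
  apply stepB_congr 3 _ _ a b (by norm_num) (by norm_num) _ h
  exact stepB_congr 2 _ _ a b (by norm_num) (by norm_num) rfl h

theorem key_small : ∀ n : Nat, n < 60 → flames_result (n : Int) = flames_result_alt (n : Int) := by
  decide

theorem flames_result_spec : Claim_equal_flames_result := by
  unfold Claim_equal_flames_result Spec_flames_result
  intro count _
  have h60 : (0 : Int) < 60 := by norm_num
  set r : Int := PySem.Int.mod count 60 with hrdef
  have hr0 : 0 ≤ r := PySem.Int.mod_nonneg count h60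
  have hrlt : r < 60 := PySem.Int.mod_lt count h60
  have hre : r = count % 60 := by rw [hrdef, PySem.Int.mod_eq_emod_of_pos h60]
  have hmod : count % 60 = r % 60 := by
    rw [hre, Int.emod_emod_of_dvd count (dvd_refl 60)]
  have hA : flames_result count = flames_result r := by
    unfold flames_result
    rw [loopA_congr count r hmod 6 _ (by simp)]
  have hB : flames_result_alt count = flames_result_alt r := by
    unfold flames_result_alt
    rw [altIdx_congr count r hmod]
  rw [hA, hB]
  have hnat : r = ((r.toNat : Nat) : Int) := by omega
  rw [hnat]
  exact key_small r.toNat (by omega)
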